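-- pv_equiv track=rewrite | github.com/liside163/essence_forge | core/datasets.py | build_stage_windows
-- ===== SOURCE A (Python) =====
-- from typing import Dict, List, Optional, Sequence, Tuple
--
-- def build_stage_windows(
--     total_length: int,
--     fault_code: int,
--     fault_onset_idx: int,
--     window_len: int,
--     stride: int,
--     normal_class_id: int = 10,
--     drop_prefault_normal_windows_for_fault_missions: bool = False,
-- ) -> List[Tuple[int, int, int]]:
--     """
--     生成阶段切窗列表。
--
--     输出每个元素 `(start, end, class_id)`，标签策略固定为：
--     - `fault_code == 10`：全窗口标注 `normal_class_id`。
--     - `fault_code in [0..9]`：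
--       - `start < onset` => `normal_class_id` 或直接丢弃（当启用预故障窗口丢弃开关）
--       - `start >= onset` => `fault_code`
--     """
--
--     if total_length <= 0 or window_len <= 0 or stride <= 0:
--         return []
--
--     if total_length >= window_len:
--         max_start = total_length - window_len
--         starts = list(range(0, max_start + 1, stride))
--     else:
--         # 序列短于窗口时仍保留一个窗口，由上层负责 padding。
--         starts = [0]
--
--     windows: List[Tuple[int, int, int]] = []
--     onset = int(fault_onset_idx)
--     if onset < 0:
--         onset = 0
--
--     for start in starts:
--         end = start + window_len
--         if int(fault_code) == 10:
--             class_id = int(normal_class_id)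
--         else:
--             if drop_prefault_normal_windows_for_fault_missions and start < onset:
--                 continue
--             class_id = int(normal_class_id) if start < onset else int(fault_code)
--         windows.append((int(start), int(end), int(class_id)))
--     return windows
-- ===== SOURCE B (Python) =====
-- from bisect import bisect_left
-- from typing import List, Tuple
--
--
-- def build_stage_windows(
--     total_length: int,
--     fault_code: int,
--     fault_onset_idx: int,
--     window_len: int,
--     stride: int,
--     normal_class_id: int = 10,
--     drop_prefault_normal_windows_for_fault_missions: bool = False,
-- ) -> List[Tuple[int, int, int]]:
--     if total_length <= 0 or window_len <= 0 or stride <= 0: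
--         return []
--
--     if total_length >= window_len:
--         starts = list(range(0, total_length - window_len + 1, stride))
--     else:
--         starts = [0]
--
--     if int(fault_code) == 10:
--         return [(int(st), int(st + window_len), int(normal_class_id)) for st in starts]
--
--     onset = max(int(fault_onset_idx), 0)
--     s = bisect_left(starts, onset)
--     pre = (
--         []
--         if drop_prefault_normal_windows_for_fault_missions
--         else [(int(st), int(st + window_len), int(normal_class_id)) for st in starts[:s]]
--     )
--     post = [(int(st), int(st + window_len), int(fault_code)) for st in starts[s:]]
--     return pre + post
-- ===== Notes on version B (the rewrite author's own statement) =====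
-- stated objective: alternative
-- what changed: Replaces the per-window conditional append loop by segment construction: bisect_left finds the normal/fault split point in the sorted starts list, and the output is built as two label-uniform mapped segments (the prefix dropped wholesale when the drop flag is set), with a single uniform map for fault_code==10.
import Mathlib
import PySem

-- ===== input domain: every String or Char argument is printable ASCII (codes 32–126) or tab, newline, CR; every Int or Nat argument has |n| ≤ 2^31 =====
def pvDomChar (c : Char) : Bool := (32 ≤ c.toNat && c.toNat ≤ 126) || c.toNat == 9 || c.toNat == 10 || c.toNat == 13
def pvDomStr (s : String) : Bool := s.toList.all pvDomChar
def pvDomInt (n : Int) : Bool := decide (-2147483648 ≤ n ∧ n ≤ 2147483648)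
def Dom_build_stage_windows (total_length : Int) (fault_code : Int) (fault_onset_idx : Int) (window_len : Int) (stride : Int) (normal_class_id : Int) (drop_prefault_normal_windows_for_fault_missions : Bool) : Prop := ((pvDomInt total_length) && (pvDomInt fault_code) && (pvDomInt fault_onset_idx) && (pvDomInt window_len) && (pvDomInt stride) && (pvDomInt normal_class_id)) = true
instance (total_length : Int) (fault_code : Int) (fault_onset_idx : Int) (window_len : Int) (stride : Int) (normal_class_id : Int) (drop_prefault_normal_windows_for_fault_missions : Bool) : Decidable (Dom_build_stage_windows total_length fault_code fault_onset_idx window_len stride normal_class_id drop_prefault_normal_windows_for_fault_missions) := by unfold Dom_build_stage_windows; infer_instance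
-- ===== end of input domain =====

-- ===== PORT A =====

-- B replaces A's per-window conditional-append loop by a bisect_left split into two label-uniform mapped segments (alternative decomposition; same cost; return value only, no mutation involved).

-- ===== PORT A =====
def build_stage_windows (total_length : Int) (fault_code : Int) (fault_onset_idx : Int) (window_len : Int) (stride : Int) (normal_class_id : Int) (drop_prefault_normal_windows_for_fault_missions : Bool) : List (Int × Int × Int) :=
  if total_length ≤ 0 ∨ window_len ≤ 0 ∨ stride ≤ 0 then []
  else
    let starts : List Int :=
      if total_length ≥ window_len then
        PySem.List.pyRange 0 (total_length - window_len + 1) stride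
      else [0]
    let onset : Int := if fault_onset_idx < 0 then 0 else fault_onset_idx
    starts.foldl (fun windows start =>
      if fault_code = 10 then
        windows ++ [(start, start + window_len, normal_class_id)]
      else if drop_prefault_normal_windows_for_fault_missions = true ∧ start < onset then
        windows
      else
        windows ++ [(start, start + window_len, if start < onset then normal_class_id else fault_code)]) []

-- ===== PORT B =====
def build_stage_windows_alt (total_length : Int) (fault_code : Int) (fault_onset_idx : Int) (window_len : Int) (stride : Int) (normal_class_id : Int) (drop_prefault_normal_windows_for_fault_missions : Bool) : List (Int × Int × Int) :=
  if total_length ≤ 0 ∨ window_len ≤ 0 ∨ stride ≤ 0 then []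
  else
    let starts : List Int :=
      if total_length ≥ window_len then
        PySem.List.pyRange 0 (total_length - window_len + 1) stride
      else [0]
    if fault_code = 10 then
      starts.map (fun st => (st, st + window_len, normal_class_id))
    else
      let onset : Int := max fault_onset_idx 0
      let s : Nat := PySem.List.bisectLeft starts onset
      let pre : List (Int × Int × Int) :=
        if drop_prefault_normal_windows_for_fault_missions then []
        else (PySem.List.slice starts none (some (s : Int))).map
          (fun st => (st, st + window_len, normal_class_id))
      pre ++ (PySem.List.slice starts (some (s : Int)) none).map
        (fun st => (st, st + window_len, fault_code))

-- ===== PRECONDITION & SPEC =====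
def Spec_build_stage_windows (total_length : Int) (fault_code : Int) (fault_onset_idx : Int) (window_len : Int) (stride : Int) (normal_class_id : Int) (drop_prefault_normal_windows_for_fault_missions : Bool) (out : List (Int × Int × Int)) : Prop := out = build_stage_windows_alt total_length fault_code fault_onset_idx window_len stride normal_class_id drop_prefault_normal_windows_for_fault_missions
instance (total_length : Int) (fault_code : Int) (fault_onset_idx : Int) (window_len : Int) (stride : Int) (normal_class_id : Int) (drop_prefault_normal_windows_for_fault_missions : Bool) (out : List (Int × Int × Int)) : Decidable (Spec_build_stage_windows total_length fault_code fault_onset_idx window_len stride normal_class_id drop_prefault_normal_windows_for_fault_missions out) := by unfold Spec_build_stage_windows; infer_instance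

-- ===== CLAIM (what is proved, stated in full; the proofs are below) =====
def Claim_equal_build_stage_windows : Prop := ∀ (total_length : Int) (fault_code : Int) (fault_onset_idx : Int) (window_len : Int) (stride : Int) (normal_class_id : Int) (drop_prefault_normal_windows_for_fault_missions : Bool), Dom_build_stage_windows total_length fault_code fault_onset_idx window_len stride normal_class_id drop_prefault_normal_windows_for_fault_missions → Spec_build_stage_windows total_length fault_code fault_onset_idx window_len stride normal_class_id drop_prefault_normal_windows_for_fault_missions (build_stage_windows total_length fault_code fault_onset_idx window_len stride normal_class_id drop_prefault_normal_windows_for_fault_missions)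

-- ===== LEMMAS AND PROOFS =====

-- Flattening a list of singletons is a map (normal form simp leaves the folds in).
lemma pvFlattenSingleton {α β : Type} (f : α → β) (l : List α) : (l.map (fun x => [f x])).flatten = l.map f := by
  induction l with
  | nil => simp
  | cons x xs ih => simp [ih]

-- A's loop over a run of starts that are all < onset: skipped entirely when dropping, else a uniform normal-labelled map.
lemma pvFoldlAllLt (onset wl nc fc : Int) (drop : Bool) (l : List Int) (acc : List (Int × Int × Int)) (h : ∀ x ∈ l, x < onset) :
    l.foldl (fun windows start =>
      if drop = true ∧ start < onset then windows
      else windows ++ [(start, start + wl, if start < onset then nc else fc)]) acc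
    = if drop then acc else acc ++ l.map (fun st => (st, st + wl, nc)) := by
  induction l generalizing acc with
  | nil => cases drop <;> simp
  | cons x xs ih =>
    have hx : x < onset := h x (by simp)
    have hxs : ∀ y ∈ xs, y < onset := fun y hy => h y (by simp [hy])
    cases drop with
    | true =>
      rw [List.foldl_cons, if_pos ⟨rfl, hx⟩, ih _ hxs]
      simp
    | false =>
      rw [List.foldl_cons, if_neg (by simp), ih _ hxs]
      simp [hx]

-- A's loop over a run of starts that are all ≥ onset: a uniform fault-labelled map.
lemma pvFoldlAllGe (onset wl nc fc : Int) (drop : Bool) (l : List Int) (acc : List (Int × Int × Int)) (h : ∀ x ∈ l, ¬ x < onset) :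
    l.foldl (fun windows start =>
      if drop = true ∧ start < onset then windows
      else windows ++ [(start, start + wl, if start < onset then nc else fc)]) acc
    = acc ++ l.map (fun st => (st, st + wl, fc)) := by
  induction l generalizing acc with
  | nil => simp
  | cons x xs ih =>
    have hx : ¬ x < onset := h x (by simp)
    have hxs : ∀ y ∈ xs, ¬ y < onset := fun y hy => h y (by simp [hy])
    simp [hx, ih _ hxs]

-- Core decomposition: on a sorted starts list, A's conditional loop equals B's two segments split at bisect_left.
lemma pvSplit (onset wl nc fc : Int) (drop : Bool) (l : List Int) (hs : l.Pairwise (· ≤ ·)) :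
    l.foldl (fun windows start =>
      if drop = true ∧ start < onset then windows
      else windows ++ [(start, start + wl, if start < onset then nc else fc)]) []
    = (if drop then [] else (l.take (PySem.List.bisectLeft l onset)).map (fun st => (st, st + wl, nc)))
      ++ (l.drop (PySem.List.bisectLeft l onset)).map (fun st => (st, st + wl, fc)) := by
  obtain ⟨hle, hlt, hge⟩ := PySem.List.bisectLeft_spec l onset hs
  set s := PySem.List.bisectLeft l onset with hsdef
  have htake : ∀ x ∈ l.take s, x < onset := by
    intro x hx
    obtain ⟨j, hj, hjx⟩ := List.mem_take_iff_getElem.mp hx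
    exact hjx ▸ hlt j (by omega) (by omega)
  have hdrop : ∀ x ∈ l.drop s, ¬ x < onset := by
    intro x hx
    obtain ⟨j, hj, hjx⟩ := List.mem_drop_iff_getElem.mp hx
    have := hge (s + j) (by omega) (by omega)
    omega
  calc
    _ = (l.take s ++ l.drop s).foldl (fun windows start =>
          if drop = true ∧ start < onset then windows
          else windows ++ [(start, start + wl, if start < onset then nc else fc)]) [] := by
        rw [List.take_append_drop]
    _ = _ := by
        rw [List.foldl_append, pvFoldlAllLt onset wl nc fc drop _ _ htake,
            pvFoldlAllGe onset wl nc fc drop _ _ hdrop]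
        cases drop <;> simp

-- A positive-step range is nondecreasing.
lemma pvStartsSorted (a b step : Int) (h : 0 < step) : (PySem.List.pyRange a b step).Pairwise (· ≤ ·) := by
  rw [PySem.List.pyRange_of_pos a b h]
  refine List.pairwise_map.mpr ((List.pairwise_lt_range).imp ?_)
  intro i j hij
  have hij' : (i : Int) ≤ (j : Int) := by exact_mod_cast hij.le
  nlinarith

-- ===== VERDICT (by name: the statement is the Claim_ definition above) =====
theorem build_stage_windows_spec : Claim_equal_build_stage_windows := by
  intro tl fc fo wl st nc drop _
  unfold Spec_build_stage_windows build_stage_windows build_stage_windows_alt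
  by_cases hz : tl ≤ 0 ∨ wl ≤ 0 ∨ st ≤ 0
  · simp [hz]
  · simp only [if_neg hz]
    push Not at hz
    obtain ⟨htl, hwl, hst⟩ := hz
    set starts : List Int := if tl ≥ wl then PySem.List.pyRange 0 (tl - wl + 1) st else [0] with hstarts
    have hsorted : starts.Pairwise (· ≤ ·) := by
      rw [hstarts]; split
      · exact pvStartsSorted _ _ _ (by omega)
      · simp
    by_cases hfc : fc = 10
    · simp [hfc, pvFlattenSingleton]
    · have honset : (if fo < 0 then (0:Int) else fo) = max fo 0 := by split <;> omega
      simp only [if_neg hfc, honset]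
      rw [pvSplit (max fo 0) wl nc fc drop starts hsorted,
          PySem.List.slice_to_natCast, PySem.List.slice_from_natCast]
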